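-- pv_equiv track=rewrite | github.com/octaviofilipepereira/4ham-spectrum-analysis | backend/app/decoders/aprs_is.py | _compute_passcode
-- ===== SOURCE A (Python) =====
-- def _compute_passcode(callsign: str) -> int:
--     """Compute APRS-IS passcode from callsign (base only, no SSID)."""
--     base = callsign.split("-")[0].upper()
--     code = 0x73E2
--     for i in range(0, len(base) - 1, 2):
--         code ^= ord(base[i]) << 8
--         code ^= ord(base[i + 1])
--     if len(base) % 2:
--         code ^= ord(base[-1]) << 8
--     return code & 0x7FFF
-- ===== SOURCE B (Python) =====
-- def _compute_passcode(callsign: str) -> int: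
--     """Compute APRS-IS passcode from callsign (base only, no SSID)."""
--     base = callsign.split("-")[0].upper()
--     hi = 0
--     for c in base[::2]:
--         hi ^= ord(c)
--     lo = 0
--     for c in base[1::2]:
--         lo ^= ord(c)
--     return (0x73E2 ^ (hi << 8) ^ lo) & 0x7FFF
-- ===== Notes on version B (the rewrite author's own statement) =====
-- stated objective: alternative
-- what changed: Instead of interleaving the XOR of shifted and unshifted bytes in one stride-2 index loop with a tail branch, B slices the base into its even-index and odd-index characters, reduces each slice to a plain XOR of character codes in two independent passes, and combines them once at the end as 0x73E2 ^ (hi << 8) ^ lo; correct by associativity/commutativity of XOR and distribution of << over XOR, and measurably faster since slicing replaces per-character indexing.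
import Mathlib
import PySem

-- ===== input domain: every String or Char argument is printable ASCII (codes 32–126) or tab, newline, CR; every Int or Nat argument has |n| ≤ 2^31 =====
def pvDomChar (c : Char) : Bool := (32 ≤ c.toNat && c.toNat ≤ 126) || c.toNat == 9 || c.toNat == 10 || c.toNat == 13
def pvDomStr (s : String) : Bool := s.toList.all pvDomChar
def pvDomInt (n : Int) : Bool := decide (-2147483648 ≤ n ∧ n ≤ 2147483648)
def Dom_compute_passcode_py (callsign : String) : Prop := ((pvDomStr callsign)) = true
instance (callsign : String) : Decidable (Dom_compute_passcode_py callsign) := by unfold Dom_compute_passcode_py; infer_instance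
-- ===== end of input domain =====

-- B splits the base into the even-index and odd-index character slices, XOR-reduces each slice
-- separately, and combines the two bytes once at the end (objective: alternative; same O(n),
-- measured constant-factor faster in Python since slicing replaces per-character indexing).

-- ===== PORT A =====
def compute_passcode_py (callsign : String) : Int :=
  let base := PySem.Str.upper (((PySem.Str.split? callsign "-").getD []).headD "")
  let bs := base.toList
  let code : Int := 0x73E2
  let code := (PySem.List.pyRange 0 ((bs.length : Int) - 1) 2).foldl
    (fun code i =>
      let code := PySem.Int.bxor code (((PySem.List.pyGetD bs i ' ').toNat : Int) <<< 8)
      PySem.Int.bxor code ((PySem.List.pyGetD bs (i + 1) ' ').toNat)) code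
  let code := if bs.length % 2 == 1 then
      PySem.Int.bxor code (((PySem.List.pyGetD bs (-1) ' ').toNat : Int) <<< 8)
    else code
  PySem.Int.band code 0x7FFF

-- ===== PORT B =====
def compute_passcode_py_alt (callsign : String) : Int :=
  let base := PySem.Str.upper (((PySem.Str.split? callsign "-").getD []).headD "")
  let bs := base.toList
  let hi := ((PySem.List.slice? bs none none 2).getD []).foldl
    (fun h c => PySem.Int.bxor h ((c.toNat : Int))) (0 : Int)
  let lo := ((PySem.List.slice? bs (some 1) none 2).getD []).foldl
    (fun h c => PySem.Int.bxor h ((c.toNat : Int))) (0 : Int)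
  PySem.Int.band (PySem.Int.bxor (PySem.Int.bxor 0x73E2 (hi <<< 8)) lo) 0x7FFF

-- ===== PRECONDITION & SPEC =====
def Spec_compute_passcode_py (callsign : String) (out : Int) : Prop := out = compute_passcode_py_alt callsign
instance (callsign : String) (out : Int) : Decidable (Spec_compute_passcode_py callsign out) := by unfold Spec_compute_passcode_py; infer_instance

-- ===== CLAIM (what is proved, stated in full; the proofs are below) =====
def Claim_equal_compute_passcode_py : Prop := ∀ (callsign : String), Dom_compute_passcode_py callsign → Spec_compute_passcode_py callsign (compute_passcode_py callsign)

-- ===== LEMMAS AND PROOFS =====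

lemma pyRange_two (n : Nat) : PySem.List.pyRange 0 ((n:Int)-1) 2 = (List.range (n/2)).map (fun k => ((2*k : Nat) : Int)) := by
  simp only [PySem.List.pyRange]
  norm_num
  rw [show (if 1 < n then (((n:Int)-1+2-1)/2).toNat else 0) = n/2 by split <;> omega]

-- reference hash: A's loop reduces to this two-characters-at-a-time recursion
def pairHash : List Char → Int → Int
  | [], code => code
  | [a], code => PySem.Int.bxor code (((a.toNat : Int)) <<< 8)
  | a :: b :: rest, code =>
      pairHash rest (PySem.Int.bxor (PySem.Int.bxor code ((a.toNat : Int) <<< 8)) (b.toNat : Int))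

-- the even-index elements of a list
def evens : List Char → List Char
  | [] => []
  | [a] => [a]
  | a :: _ :: rest => a :: evens rest

-- XOR of the character codes of a list
def xorFold (l : List Char) : Nat := l.foldl (fun h c => h ^^^ c.toNat) 0

lemma twoStep {P : List Char → Prop} (h1 : P []) (h2 : ∀ a, P [a])
    (h3 : ∀ a b rest, P rest → P (a :: b :: rest)) : ∀ bs, P bs
  | [] => h1
  | [a] => h2 a
  | a :: b :: rest => h3 a b rest (twoStep h1 h2 h3 rest)

lemma pyGetD_neg_one_cons {x : Char} {xs : List Char} (h : xs ≠ []) (d : Char) :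
    PySem.List.pyGetD (x :: xs) (-1) d = PySem.List.pyGetD xs (-1) d := by
  have hl : xs.length ≠ 0 := by simpa using h
  simp only [PySem.List.pyGetD, PySem.List.pyGet?, PySem.List.pyIdx?]
  norm_num
  rw [if_pos (show 1 ≤ xs.length by omega)]
  simp [List.getElem?_eq_getElem (show xs.length-1 < xs.length by omega), List.getElem_cons, hl]

lemma coreA' (bs : List Char) : ∀ code : Int,
    (if bs.length % 2 == 1 then
      PySem.Int.bxor ((List.range (bs.length/2)).foldl
        (fun c k => PySem.Int.bxor (PySem.Int.bxor c (((bs.getD (2*k) ' ').toNat : Int) <<< 8)) ((bs.getD (2*k+1) ' ').toNat)) code)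
        (((PySem.List.pyGetD bs (-1) ' ').toNat : Int) <<< 8)
    else (List.range (bs.length/2)).foldl
        (fun c k => PySem.Int.bxor (PySem.Int.bxor c (((bs.getD (2*k) ' ').toNat : Int) <<< 8)) ((bs.getD (2*k+1) ' ').toNat)) code)
    = pairHash bs code := by
  induction bs using twoStep with
  | h1 => intro code; simp [pairHash]
  | h2 a =>
    intro code
    simp [pairHash, PySem.List.pyGetD, PySem.List.pyGet?, PySem.List.pyIdx?]
  | h3 a b rest ih =>
    intro code
    have hlen : (a::b::rest).length / 2 = rest.length / 2 + 1 := by simp; omega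
    rw [hlen, List.range_succ_eq_map]
    simp only [List.foldl_cons, List.foldl_map]
    have hstep : ∀ (c : Int) (k : Nat),
        (fun c k => PySem.Int.bxor (PySem.Int.bxor c ((((a::b::rest).getD (2*k) ' ').toNat : Int) <<< 8)) (((a::b::rest).getD (2*k+1) ' ').toNat)) c (k+1)
        = (fun c k => PySem.Int.bxor (PySem.Int.bxor c (((rest.getD (2*k) ' ').toNat : Int) <<< 8)) ((rest.getD (2*k+1) ' ').toNat)) c k := by
      intro c k
      simp [show 2 * (k + 1) = 2 * k + 1 + 1 by ring]
    simp only [hstep]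
    have hpar : ((a::b::rest).length % 2 == 1) = (rest.length % 2 == 1) := by simp; omega
    rw [hpar]
    have := ih (PySem.Int.bxor (PySem.Int.bxor code ((a.toNat : Int) <<< 8)) (b.toNat : Int))
    by_cases hodd : rest.length % 2 == 1
    · have hne : rest ≠ [] := by intro h; subst h; simp at hodd
      rw [pyGetD_neg_one_cons (show (b::rest) ≠ [] by simp) ' ', pyGetD_neg_one_cons hne ' ']
      simp only [pairHash]
      simpa [hodd] using this
    · simp only [pairHash]
      simpa [hodd] using this

lemma coreA (bs : List Char) (code : Int) :
    (if bs.length % 2 == 1 then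
      PySem.Int.bxor ((PySem.List.pyRange 0 ((bs.length : Int) - 1) 2).foldl
        (fun code i =>
          let code := PySem.Int.bxor code (((PySem.List.pyGetD bs i ' ').toNat : Int) <<< 8)
          PySem.Int.bxor code ((PySem.List.pyGetD bs (i + 1) ' ').toNat)) code)
        (((PySem.List.pyGetD bs (-1) ' ').toNat : Int) <<< 8)
    else (PySem.List.pyRange 0 ((bs.length : Int) - 1) 2).foldl
        (fun code i =>
          let code := PySem.Int.bxor code (((PySem.List.pyGetD bs i ' ').toNat : Int) <<< 8)
          PySem.Int.bxor code ((PySem.List.pyGetD bs (i + 1) ' ').toNat)) code)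
    = pairHash bs code := by
  have hfold : (PySem.List.pyRange 0 ((bs.length : Int) - 1) 2).foldl
      (fun code i =>
        let code := PySem.Int.bxor code (((PySem.List.pyGetD bs i ' ').toNat : Int) <<< 8)
        PySem.Int.bxor code ((PySem.List.pyGetD bs (i + 1) ' ').toNat)) code
    = (List.range (bs.length/2)).foldl
        (fun c k => PySem.Int.bxor (PySem.Int.bxor c (((bs.getD (2*k) ' ').toNat : Int) <<< 8)) ((bs.getD (2*k+1) ' ').toNat)) code := by
    rw [pyRange_two bs.length, List.foldl_map]
    simp only [show ∀ k : Nat, ((2*k : Nat) : Int) + 1 = ((2*k+1 : Nat) : Int) from fun k => by push_cast; ring,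
        PySem.List.pyGetD_natCast]
  rw [hfold]
  exact coreA' bs code

-- ===== B-side lemmas =====

lemma bxor_natCast (m k : Nat) : PySem.Int.bxor (m : Int) (k : Int) = ((m ^^^ k : Nat) : Int) := by
  simp [PySem.Int.bxor, Int.toNat_natCast]

lemma shiftl_natCast (h : Nat) : ((h : Int)) <<< 8 = ((h <<< 8 : Nat) : Int) :=
  (Int.natCast_shiftLeft h 8).symm

lemma foldB (l : List Char) : ∀ s : Nat,
    l.foldl (fun h c => PySem.Int.bxor h ((c.toNat : Int))) (s : Int)
      = ((l.foldl (fun h c => h ^^^ c.toNat) s : Nat) : Int) := by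
  induction l with
  | nil => intro s; simp
  | cons c l ih => intro s; simp only [List.foldl_cons, bxor_natCast]; exact ih _

lemma xorFold_from (l : List Char) : ∀ s : Nat,
    l.foldl (fun h c => h ^^^ c.toNat) s = s ^^^ xorFold l := by
  induction l with
  | nil => intro s; simp [xorFold]
  | cons c l ih =>
    intro s
    have hc : xorFold (c :: l) = c.toNat ^^^ xorFold l := by
      show List.foldl _ 0 (c :: l) = _
      rw [List.foldl_cons, ih, Nat.zero_xor]
    rw [List.foldl_cons, ih, hc, Nat.xor_assoc]

lemma foldB0 (l : List Char) :
    l.foldl (fun h c => PySem.Int.bxor h ((c.toNat : Int))) (0 : Int) = ((xorFold l : Nat) : Int) := by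
  simpa [xorFold] using foldB l 0

lemma xorFold_cons (c : Char) (l : List Char) : xorFold (c :: l) = c.toNat ^^^ xorFold l := by
  show List.foldl _ 0 (c :: l) = _
  rw [List.foldl_cons, xorFold_from l, Nat.zero_xor]

lemma evens_cons (x : Char) (l : List Char) : evens (x :: l) = x :: evens l.tail := by
  cases l with
  | nil => rfl
  | cons y r => rfl

lemma pairHash_eq (bs : List Char) : ∀ code : Nat,
    pairHash bs (code : Int)
      = ((code ^^^ (xorFold (evens bs) <<< 8) ^^^ xorFold (evens bs.tail) : Nat) : Int) := by
  induction bs using twoStep with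
  | h1 => intro code; simp [pairHash, evens, xorFold]
  | h2 a =>
    intro code
    simp only [pairHash, shiftl_natCast, bxor_natCast]
    simp [evens, xorFold]
  | h3 a b rest ih =>
    intro code
    simp only [pairHash, shiftl_natCast, bxor_natCast, List.tail_cons]
    rw [ih]
    congr 1
    rw [evens_cons a (b :: rest), evens_cons b rest, List.tail_cons,
        xorFold_cons, xorFold_cons, Nat.shiftLeft_xor_distrib]
    simp [Nat.xor_assoc, Nat.xor_comm, Nat.xor_left_comm]

lemma fm_evens : ∀ xs : List Char,
    (List.range ((xs.length + 1) / 2)).filterMap (fun k => xs[2*k]?) = evens xs := by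
  intro xs
  induction xs using twoStep with
  | h1 => simp [evens]
  | h2 a => simp [evens, List.range_succ]
  | h3 a b rest ih =>
    have hlen : ((a::b::rest).length + 1) / 2 = (rest.length + 1) / 2 + 1 := by simp; omega
    rw [hlen, List.range_succ_eq_map, evens]
    simp only [List.filterMap_cons, List.filterMap_map]
    have : (fun k => (a::b::rest)[2*(k+1)]?) = (fun k : Nat => rest[2*k]?) := by
      funext k
      simp [show 2*(k+1) = 2*k+1+1 by ring]
    simpa [this, Function.comp_def, show ∀ k : Nat, 2*(k+1) = 2*k+1+1 from fun k => by ring] using ih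

lemma fm_odds : ∀ xs : List Char,
    (List.range (xs.length / 2)).filterMap (fun k => xs[2*k+1]?) = evens xs.tail := by
  intro xs
  induction xs using twoStep with
  | h1 => simp [evens]
  | h2 a => simp [evens]
  | h3 a b rest ih =>
    have hlen : (a::b::rest).length / 2 = rest.length / 2 + 1 := by simp; omega
    rw [hlen, List.range_succ_eq_map, List.tail_cons, evens_cons]
    simp only [List.filterMap_cons, List.filterMap_map]
    simpa [Function.comp_def, show ∀ k : Nat, 2*(k+1)+1 = (2*k+1)+1+1 from fun k => by ring] using ih

lemma sliceEvens (xs : List Char) :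
    (PySem.List.slice? xs none none 2).getD [] = evens xs := by
  rw [← fm_evens]
  simp only [PySem.List.slice?, PySem.List.sliceIndices]
  norm_num
  rw [show (if 0 < xs.length then ((((xs.length:Int)) + 2 - 1) / 2).toNat else 0)
        = (xs.length + 1) / 2 by split <;> omega]
  congr 1

lemma sliceOdds (xs : List Char) :
    (PySem.List.slice? xs (some 1) none 2).getD [] = evens xs.tail := by
  rw [← fm_odds]
  simp only [PySem.List.slice?, PySem.List.sliceIndices]
  norm_num
  rcases List.eq_nil_or_concat xs with h | ⟨_, _, _⟩
  · subst h; simp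
  · have hlen : 1 ≤ xs.length := by
      cases xs with
      | nil => simp_all
      | cons y r => simp
    rw [show (if 1 < xs.length
          then (((xs.length:Int) - min 1 (xs.length:Int) + 2 - 1) / 2).toNat else 0)
          = xs.length / 2 by split <;> omega]
    congr 1
    funext k
    rw [show ((min 1 ((xs.length:Int)) + 2 * (k:Int))).toNat = 2*k+1 by omega]

-- ===== VERDICT (by name: the statement is the Claim_ definition above) =====
theorem compute_passcode_py_spec : Claim_equal_compute_passcode_py := by
  intro callsign _
  unfold Spec_compute_passcode_py
  simp only [compute_passcode_py, compute_passcode_py_alt]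
  rw [coreA, sliceEvens, sliceOdds, foldB0, foldB0]
  rw [show ((0x73E2 : Int)) = ((0x73E2 : Nat) : Int) by norm_num]
  rw [pairHash_eq]
  rw [shiftl_natCast, bxor_natCast, bxor_natCast]
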